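-- pv_equiv track=rewrite | github.com/mikegsaunders/marcfinder | marc_cli/main.py | search_by_code
-- ===== SOURCE A (Python) =====
-- from typing import Dict, List, Tuple
--
-- def search_by_code(data: Dict[str, dict], code: str) -> List[Tuple[str, dict]]:
--     """
--     Search for fields/subfields by code prefix.
--     Returns list of (key, entry) tuples matching the code.
--     """
--     code_lower = code.lower()
--     matches = []
--
--     for key, entry in data.items():
--         if key.lower().startswith(code_lower):
--             matches.append((key, entry))
--
--     # Sort by:
--     # 1. Key length (exact match first - field before subfields)
--     # 2. For subfields (len > 3): alphabetic subfields (a-z) before numeric (0-9)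
--     # 3. Then alphabetically within each group
--     def sort_key(item):
--         key = item[0]
--         if len(key) == 3:
--             # Field code - comes first
--             return (0, key)
--         else:
--             # Subfield - separate alphabetic from numeric
--             subfield_char = key[3]
--             if subfield_char.isalpha():
--                 return (1, key)  # Alphabetic subfields
--             else:
--                 return (2, key)  # Numeric subfields
--
--     matches.sort(key=sort_key)
--
--     return matches
-- ===== SOURCE B (Python) =====
-- from typing import Dict, List, Tuple
--
-- def search_by_code(data: Dict[str, dict], code: str) -> List[Tuple[str, dict]]:
--     """One pass routes each matching key into field / alphabetic-subfield /
--     numeric-subfield buckets; each bucket is sorted by key and the three are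
--     concatenated in that fixed order."""
--     code_lower = code.lower()
--     fields: list = []
--     alphas: list = []
--     nums: list = []
--     for key, entry in data.items():
--         if not key.lower().startswith(code_lower):
--             continue
--         if len(key) == 3:
--             fields.append((key, entry))
--         elif key[3].isalpha():
--             alphas.append((key, entry))
--         else:
--             nums.append((key, entry))
--     fields.sort(key=lambda t: t[0])
--     alphas.sort(key=lambda t: t[0])
--     nums.sort(key=lambda t: t[0])
--     return fields + alphas + nums
-- ===== Notes on version B (the rewrite author's own statement) =====
-- stated objective: alternative
-- what changed: B replaces the single sort under a composite (group, key) sort key by a one-pass partition of the matches into three buckets (field / alphabetic subfield / numeric subfield), sorts each bucket by its key string alone, and concatenates the buckets in the fixed group order.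
import Mathlib
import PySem

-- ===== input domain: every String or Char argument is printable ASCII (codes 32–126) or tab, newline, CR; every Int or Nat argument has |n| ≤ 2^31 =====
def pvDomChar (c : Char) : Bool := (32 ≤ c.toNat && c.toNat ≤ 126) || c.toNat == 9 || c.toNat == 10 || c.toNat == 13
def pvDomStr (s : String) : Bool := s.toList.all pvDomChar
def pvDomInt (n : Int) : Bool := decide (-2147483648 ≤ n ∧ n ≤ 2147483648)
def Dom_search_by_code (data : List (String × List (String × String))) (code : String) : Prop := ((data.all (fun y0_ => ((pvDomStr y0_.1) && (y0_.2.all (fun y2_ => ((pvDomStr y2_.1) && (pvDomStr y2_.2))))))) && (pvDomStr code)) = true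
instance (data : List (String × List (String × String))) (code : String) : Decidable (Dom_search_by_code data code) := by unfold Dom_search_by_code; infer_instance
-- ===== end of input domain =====

-- B partitions the prefix-matching keys into field / alphabetic-subfield / numeric-subfield
-- buckets in one pass and sorts each bucket by its key alone, instead of A's single sort
-- under a composite (group, key) sort key ("alternative" objective; return value only).


-- ===== PORT A =====
-- sort_key's group component: 0 for a 3-char field, 1/2 for alphabetic/numeric subfields.
-- The 'none' branch is where Python's key[3] raises IndexError — excluded by Pre_.
def pvSortGroup (key : String) : Int :=
  if PySem.Str.len key = 3 then 0
  else
    match PySem.Str.pyGet? key 3 with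
    | some c => if PySem.Chars.isalpha c then 1 else 2
    | none => 2

def search_by_code (data : List (String × List (String × String))) (code : String) : List (String × (List (String × String))) :=
  let codeLower := PySem.Str.lower code
  let matchesL := (PySem.Dict.ofList data).items.foldl
    (fun acc kv => if PySem.Str.startswith (PySem.Str.lower kv.1) codeLower then acc ++ [kv] else acc) []
  PySem.List.sorted2 matchesL (fun item => pvSortGroup item.1) (fun item => item.1) false

-- ===== PORT B =====
-- B's loop body: route a matching (key, entry) into the field / alpha / numeric bucket.
-- The 'none' branch is where Python's key[3] raises IndexError — excluded by Pre_.
def pvRoute (codeLower : String)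
    (acc : List (String × List (String × String)) × List (String × List (String × String)) × List (String × List (String × String)))
    (kv : String × List (String × String)) :
    List (String × List (String × String)) × List (String × List (String × String)) × List (String × List (String × String)) :=
  if PySem.Str.startswith (PySem.Str.lower kv.1) codeLower then
    if PySem.Str.len kv.1 = 3 then (acc.1 ++ [kv], acc.2.1, acc.2.2)
    else
      match PySem.Str.pyGet? kv.1 3 with
      | some c =>
          if PySem.Chars.isalpha c then (acc.1, acc.2.1 ++ [kv], acc.2.2)
          else (acc.1, acc.2.1, acc.2.2 ++ [kv])
      | none => (acc.1, acc.2.1, acc.2.2 ++ [kv])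
  else acc

def search_by_code_alt (data : List (String × List (String × String))) (code : String) : List (String × (List (String × String))) :=
  let codeLower := PySem.Str.lower code
  let buckets := (PySem.Dict.ofList data).items.foldl (pvRoute codeLower) ([], [], [])
  PySem.List.sorted buckets.1 (fun t => t.1) ++
    PySem.List.sorted buckets.2.1 (fun t => t.1) ++
    PySem.List.sorted buckets.2.2 (fun t => t.1)

-- ===== PRECONDITION & SPEC =====
-- Pre_ excludes exactly the inputs where Python raises IndexError (key[3] inside the sort
-- key): some key matching the lowered prefix has length < 3 (length 3 and ≥ 4 are fine).
def Pre_search_by_code (data : List (String × List (String × String))) (code : String) : Prop :=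
  ∀ kv ∈ data, PySem.Str.startswith (PySem.Str.lower kv.1) (PySem.Str.lower code) = true →
    PySem.Str.len kv.1 = 3 ∨ 4 ≤ PySem.Str.len kv.1
instance (data : List (String × List (String × String))) (code : String) : Decidable (Pre_search_by_code data code) := by unfold Pre_search_by_code; infer_instance

def pvWitness_search_by_code : (List (String × List (String × String))) × String :=
  ([("245", [("desc", "Title")]), ("245a", []), ("2450", [("d", "x")]), ("100", [])], "24")

def Spec_search_by_code (data : List (String × List (String × String))) (code : String) (out : List (String × (List (String × String)))) : Prop := out = search_by_code_alt data code
instance (data : List (String × List (String × String))) (code : String) (out : List (String × (List (String × String)))) : Decidable (Spec_search_by_code data code out) := by unfold Spec_search_by_code; infer_instance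

-- ===== CLAIM (what is proved, stated in full; the proofs are below) =====
def Claim_equal_search_by_code : Prop := ∀ (data : List (String × List (String × String))) (code : String), Dom_search_by_code data code → Pre_search_by_code data code → Spec_search_by_code data code (search_by_code data code)

-- ===== LEMMAS AND PROOFS =====

lemma pvSortGroup_cases (s : String) : pvSortGroup s = 0 ∨ pvSortGroup s = 1 ∨ pvSortGroup s = 2 := by
  unfold pvSortGroup
  split
  · exact Or.inl rfl
  · cases h : PySem.Str.pyGet? s 3 with
    | none => simp
    | some c =>
        by_cases ha : PySem.Chars.isalpha c = true <;> simp [ha]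

-- pvRoute, re-expressed through A's group number (for the loop-shape lemma below)
lemma pvRoute_eq (cl : String)
    (acc : List (String × List (String × String)) × List (String × List (String × String)) × List (String × List (String × String)))
    (kv : String × List (String × String)) :
    pvRoute cl acc kv =
      if PySem.Str.startswith (PySem.Str.lower kv.1) cl then
        if pvSortGroup kv.1 = 0 then (acc.1 ++ [kv], acc.2.1, acc.2.2)
        else if pvSortGroup kv.1 = 1 then (acc.1, acc.2.1 ++ [kv], acc.2.2)
        else (acc.1, acc.2.1, acc.2.2 ++ [kv])
      else acc := by
  unfold pvRoute pvSortGroup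
  by_cases hp : PySem.Str.startswith (PySem.Str.lower kv.1) cl = true <;>
    by_cases h3 : PySem.Str.len kv.1 = 3 <;>
      cases h : PySem.Str.pyGet? kv.1 3 <;>
        simp_all <;> split_ifs <;> simp_all

-- every insert preserves nodup keys
lemma pv_nodup_keys_insert {κ ν : Type} [BEq κ] [LawfulBEq κ] (d : PySem.Dict κ ν) (k : κ) (v : ν)
    (h : d.keys.Nodup) : (d.insert k v).keys.Nodup := by
  rcases hc : d.contains k with _ | _
  · have hi := PySem.Dict.items_insert_of_not_contains d v hc
    have hk : (d.insert k v).keys = d.keys ++ [k] := by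
      simp [PySem.Dict.keys, hi]
    rw [hk]
    have hmem : k ∉ d.keys := by
      intro hm
      rw [← PySem.Dict.contains_iff_mem_keys] at hm
      simp [hc] at hm
    rw [List.nodup_append]
    exact ⟨h, by simp, fun a ha b hb => by
      simp only [List.mem_singleton] at hb
      subst hb
      exact fun he => hmem (he ▸ ha)⟩
  · rw [PySem.Dict.keys_insert_of_contains d v hc]
    exact h

lemma pv_nodup_keys_ofList {κ ν : Type} [BEq κ] [LawfulBEq κ] (l : List (κ × ν)) :
    (PySem.Dict.ofList l).keys.Nodup := by
  have main : ∀ (l : List (κ × ν)) (d : PySem.Dict κ ν), d.keys.Nodup → (d.update l).keys.Nodup := by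
    intro l
    induction l with
    | nil => intro d h; exact h
    | cons p t ih =>
        intro d h
        have := ih (d.insert p.1 p.2) (pv_nodup_keys_insert d p.1 p.2 h)
        simpa [PySem.Dict.update] using this
  exact main l PySem.Dict.empty (by simp [PySem.Dict.keys, PySem.Dict.empty])

-- B's loop computes the three group-filtered sublists of the matches, in order.
lemma pvRoute_foldl (cl : String) (l : List (String × List (String × String)))
    (acc : List (String × List (String × String)) × List (String × List (String × String)) × List (String × List (String × String))) :
    l.foldl (pvRoute cl) acc =
      (acc.1 ++ (l.filter (fun kv => PySem.Str.startswith (PySem.Str.lower kv.1) cl)).filter (fun it => pvSortGroup it.1 == 0),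
       acc.2.1 ++ (l.filter (fun kv => PySem.Str.startswith (PySem.Str.lower kv.1) cl)).filter (fun it => pvSortGroup it.1 == 1),
       acc.2.2 ++ (l.filter (fun kv => PySem.Str.startswith (PySem.Str.lower kv.1) cl)).filter (fun it => pvSortGroup it.1 == 2)) := by
  induction l generalizing acc with
  | nil => simp
  | cons kv t ih =>
      rw [List.foldl_cons, pvRoute_eq, ih]
      by_cases hp : PySem.Chars.startswith (PySem.Chars.lower kv.1.toList) cl.toList = true
      · rcases pvSortGroup_cases kv.1 with hg | hg | hg <;>
          simp [hp, hg]
      · simp [hp]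

-- the three group filters partition a list whose group function takes values 0,1,2
lemma pv_filter012_perm {α : Type} (g : α → Int) (h : ∀ x, g x = 0 ∨ g x = 1 ∨ g x = 2)
    (l : List α) :
    ((l.filter (fun x => g x == 0) ++ l.filter (fun x => g x == 1)) ++ l.filter (fun x => g x == 2)).Perm l := by
  induction l with
  | nil => simp
  | cons x t ih =>
      rcases h x with hg | hg | hg <;> simp only [List.filter_cons, hg] <;> norm_num
      · simpa using ih.cons x
      · have ih' : (t.filter (fun x => g x == 0) ++ (t.filter (fun x => g x == 1) ++ t.filter (fun x => g x == 2))).Perm t := by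
          simpa [List.append_assoc] using ih
        exact List.perm_middle.trans (ih'.cons x)
      · rw [← List.append_assoc]
        exact List.perm_middle.trans (ih.cons x)

-- members of the sorted i-th bucket have group number i
lemma pv_bucket_group (m : List (String × List (String × String))) (i : Int)
    (a : String × List (String × String))
    (ha : a ∈ PySem.List.sorted (m.filter (fun it => pvSortGroup it.1 == i)) (fun t => t.1)) :
    pvSortGroup a.1 = i := by
  have := (PySem.List.mem_sorted _ _ _ _).mp ha
  have := List.of_mem_filter this
  simpa using this

-- the sorted i-th bucket is strictly increasing under A's composite key
lemma pv_bucket_pairwise (m : List (String × List (String × String)))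
    (hnd : (m.map (fun t => t.1)).Nodup) (i : Int) :
    (PySem.List.sorted (m.filter (fun it => pvSortGroup it.1 == i)) (fun t => t.1)).Pairwise
      (fun a b => (toLex (pvSortGroup a.1, a.1) : Int ×ₗ String) < toLex (pvSortGroup b.1, b.1)) := by
  have hsub : ((m.filter (fun it => pvSortGroup it.1 == i)).map (fun t => t.1)).Nodup :=
    hnd.sublist (List.filter_sublist.map _)
  have hperm : ((PySem.List.sorted (m.filter (fun it => pvSortGroup it.1 == i)) (fun t => t.1)).map (fun t => t.1)).Perm
      ((m.filter (fun it => pvSortGroup it.1 == i)).map (fun t => t.1)) :=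
    (PySem.List.sorted_perm _ _ _).map _
  have hnds : ((PySem.List.sorted (m.filter (fun it => pvSortGroup it.1 == i)) (fun t => t.1)).map (fun t => t.1)).Nodup :=
    hperm.nodup_iff.mpr hsub
  have hne : (PySem.List.sorted (m.filter (fun it => pvSortGroup it.1 == i)) (fun t => t.1)).Pairwise
      (fun a b => a.1 ≠ b.1) := List.pairwise_map.mp hnds
  have hle := PySem.List.sorted_pairwise (m.filter (fun it => pvSortGroup it.1 == i)) (fun t => t.1)
  refine (hle.and hne).imp_of_mem ?_
  intro a b ha hb hab
  rw [Prod.Lex.toLex_lt_toLex]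
  right
  exact ⟨by rw [pv_bucket_group m i a ha, pv_bucket_group m i b hb],
         lt_of_le_of_ne hab.1 hab.2⟩

-- bucket-then-sort-each equals one sort under the composite key, when keys are distinct
lemma pv_concat_sorted (m : List (String × List (String × String)))
    (hnd : (m.map (fun t => t.1)).Nodup) :
    PySem.List.sorted m (fun x => (toLex (pvSortGroup x.1, x.1) : Int ×ₗ String)) =
      (PySem.List.sorted (m.filter (fun it => pvSortGroup it.1 == 0)) (fun t => t.1) ++
        PySem.List.sorted (m.filter (fun it => pvSortGroup it.1 == 1)) (fun t => t.1)) ++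
      PySem.List.sorted (m.filter (fun it => pvSortGroup it.1 == 2)) (fun t => t.1) := by
  apply PySem.List.sorted_eq_of_perm_of_pairwise_lt
  · exact (((PySem.List.sorted_perm _ _ _).append (PySem.List.sorted_perm _ _ _)).append
      (PySem.List.sorted_perm _ _ _)).trans (pv_filter012_perm _ (fun x => pvSortGroup_cases x.1) m)
  · rw [List.pairwise_append]
    refine ⟨?_, pv_bucket_pairwise m hnd 2, ?_⟩
    · rw [List.pairwise_append]
      refine ⟨pv_bucket_pairwise m hnd 0, pv_bucket_pairwise m hnd 1, ?_⟩
      · intro a ha b hb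
        rw [Prod.Lex.toLex_lt_toLex]
        left
        rw [pv_bucket_group m 0 a ha, pv_bucket_group m 1 b hb]
        norm_num
    · intro a ha b hb
      rw [Prod.Lex.toLex_lt_toLex]
      left
      rw [pv_bucket_group m 2 b hb]
      rcases List.mem_append.mp ha with h0 | h1
      · rw [pv_bucket_group m 0 a h0]; norm_num
      · rw [pv_bucket_group m 1 a h1]; norm_num

-- Python's tuple-key sort IS the sort under the lexicographic product order
lemma pv_sorted2_eq_sorted_toLex {alpha : Type} (xs : List alpha) (k1 : alpha → Int) (k2 : alpha → String) :
    PySem.List.sorted2 xs k1 k2 false = PySem.List.sorted xs (fun x => (toLex (k1 x, k2 x) : Int ×ₗ String)) false := by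
  unfold PySem.List.sorted2 PySem.List.sorted
  have hfun : (fun a b => decide (k1 a < k1 b) || !decide (k1 b < k1 a) && decide (k2 a < k2 b))
      = (fun a b : alpha => decide ((toLex (k1 a, k2 a) : Int ×ₗ String) < toLex (k1 b, k2 b))) := by
    funext a b
    rcases lt_trichotomy (k1 a) (k1 b) with h | h | h
    · simp [Prod.Lex.toLex_lt_toLex, h, asymm h]
    · simp [Prod.Lex.toLex_lt_toLex, h]
    · simp [Prod.Lex.toLex_lt_toLex, asymm h, ne_of_gt h, h]
  simp only [Bool.false_eq_true, if_false, hfun]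

-- the two ports agree on ALL inputs (they default the same way where Python raises)
lemma pv_main (data : List (String × List (String × String))) (code : String) :
    search_by_code data code = search_by_code_alt data code := by
  simp only [search_by_code, search_by_code_alt]
  rw [pvRoute_foldl, pv_sorted2_eq_sorted_toLex]
  simp only [PySem.List.foldl_append_if, List.nil_append, List.map_id']
  apply pv_concat_sorted
  have hk : ((PySem.Dict.ofList data).items.map (fun t => t.1)).Nodup := pv_nodup_keys_ofList data
  exact hk.sublist (List.filter_sublist.map _)

-- ===== VERDICT (by name: the statement is the Claim_ definition above) =====
theorem search_by_code_spec : Claim_equal_search_by_code := by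
  intro data code _ _
  unfold Spec_search_by_code
  exact pv_main data code
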